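-- pv_equiv track=rewrite | github.com/sdg1309/SimulacionPTCG | Sim.py | evaluate_setup
-- ===== SOURCE A (Python) =====
-- def evaluate_setup(hand, going_first):
--
--     basics = sum(1 for c in hand if c in [
--         "Zorua",
--         "Budew",
--         "Buneary",
--         "Darumaka",
--         "Munkidori",
--         "Zekrom",
--         "Reshiram",
--         "Yveltal",
--         "Ogerpon",
--         "Fezandipiti",
--         "Pecharunt"
--     ])
--
--     optimalBasics = sum(1 for c in hand if c in [
--         "Zorua",
--         "Budew",
--         "Yveltal",
--         "Ogerpon"
--     ])
--
--     searchItem = sum(1 for c in hand if c in [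
--         "UltraBall",
--         "Poffin",
--         "Pad"
--     ])
--
--     searchSupport = sum(1 for c in hand if c in [
--         "Cyrano",
--         "Ciphermaniac"
--     ])
--
--     drawSupport = sum(1 for c in hand if c in [
--         "Lillie"
--     ])
--
--     disruption = sum(1 for c in hand if c in [
--         "Judge",
--         "Unfair",
--         "Boss"
--     ])
--
--     energy = sum(1 for c in hand if c in [
--         "DarknessEnergy",
--         "PrismEnergy"
--     ])
--
--     if going_first == True:
--
--         setup = (
--             basics >= 1
--             and
--             energy >= 1
--             and
--             searchItem >= 1
--         )
--
--         optimalSetup = (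
--             optimalBasics >= 1
--             and
--             energy >= 1
--             and
--             searchItem >= 2
--             and
--             drawSupport >= 1
--
--         )
--
--         pressure = setup and disruption >= 1
--
--         return setup, pressure, optimalSetup
--
--
--     else:
--
--         setup = (
--             basics >= 1
--             and
--             energy >= 1
--             and
--             (searchItem >= 1 or drawSupport >= 1)
--         )
--
--         optimalSetup = (
--             optimalBasics >= 1
--             and
--             energy >= 1
--             and
--             searchItem >= 2
--             and
--             (drawSupport >= 1 or searchSupport >=1)
--
--         )
--
--         pressure = setup and disruption >= 1
--
--         return setup, pressure, optimalSetup
-- ===== SOURCE B (Python) =====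
-- # One indexed pass: a card->category-increment-vector map replaces seven scans of the hand.
-- _ZERO = (0, 0, 0, 0, 0, 0, 0)
-- # (basics, optimalBasics, searchItem, searchSupport, drawSupport, disruption, energy)
-- _VEC = {
--     "Zorua":          (1, 1, 0, 0, 0, 0, 0),
--     "Budew":          (1, 1, 0, 0, 0, 0, 0),
--     "Buneary":        (1, 0, 0, 0, 0, 0, 0),
--     "Darumaka":       (1, 0, 0, 0, 0, 0, 0),
--     "Munkidori":      (1, 0, 0, 0, 0, 0, 0),
--     "Zekrom":         (1, 0, 0, 0, 0, 0, 0),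
--     "Reshiram":       (1, 0, 0, 0, 0, 0, 0),
--     "Yveltal":        (1, 1, 0, 0, 0, 0, 0),
--     "Ogerpon":        (1, 1, 0, 0, 0, 0, 0),
--     "Fezandipiti":    (1, 0, 0, 0, 0, 0, 0),
--     "Pecharunt":      (1, 0, 0, 0, 0, 0, 0),
--     "UltraBall":      (0, 0, 1, 0, 0, 0, 0),
--     "Poffin":         (0, 0, 1, 0, 0, 0, 0),
--     "Pad":            (0, 0, 1, 0, 0, 0, 0),
--     "Cyrano":         (0, 0, 0, 1, 0, 0, 0),
--     "Ciphermaniac":   (0, 0, 0, 1, 0, 0, 0),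
--     "Lillie":         (0, 0, 0, 0, 1, 0, 0),
--     "Judge":          (0, 0, 0, 0, 0, 1, 0),
--     "Unfair":         (0, 0, 0, 0, 0, 1, 0),
--     "Boss":           (0, 0, 0, 0, 0, 1, 0),
--     "DarknessEnergy": (0, 0, 0, 0, 0, 0, 1),
--     "PrismEnergy":    (0, 0, 0, 0, 0, 0, 1),
-- }
--
-- def evaluate_setup(hand, going_first):
--     basics = optimalBasics = searchItem = searchSupport = drawSupport = disruption = energy = 0
--     for c in hand:
--         v = _VEC.get(c, _ZERO)
--         basics += v[0]
--         optimalBasics += v[1]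
--         searchItem += v[2]
--         searchSupport += v[3]
--         drawSupport += v[4]
--         disruption += v[5]
--         energy += v[6]
--
--     if going_first:
--         setup = basics >= 1 and energy >= 1 and searchItem >= 1
--         optimalSetup = (optimalBasics >= 1 and energy >= 1
--                         and searchItem >= 2 and drawSupport >= 1)
--     else:
--         setup = basics >= 1 and energy >= 1 and (searchItem >= 1 or drawSupport >= 1)
--         optimalSetup = (optimalBasics >= 1 and energy >= 1
--                         and searchItem >= 2 and (drawSupport >= 1 or searchSupport >= 1))
--     pressure = setup and disruption >= 1
--     return setup, pressure, optimalSetup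
-- ===== Notes on version B (the rewrite author's own statement) =====
-- stated objective: faster
-- what changed: Replaced A's seven separate membership scans of the hand with a single pass driven by a precomputed card-name -> 7-component increment-vector dictionary (overlapping categories handled by the vector), then the same going_first branch.
import Mathlib
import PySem

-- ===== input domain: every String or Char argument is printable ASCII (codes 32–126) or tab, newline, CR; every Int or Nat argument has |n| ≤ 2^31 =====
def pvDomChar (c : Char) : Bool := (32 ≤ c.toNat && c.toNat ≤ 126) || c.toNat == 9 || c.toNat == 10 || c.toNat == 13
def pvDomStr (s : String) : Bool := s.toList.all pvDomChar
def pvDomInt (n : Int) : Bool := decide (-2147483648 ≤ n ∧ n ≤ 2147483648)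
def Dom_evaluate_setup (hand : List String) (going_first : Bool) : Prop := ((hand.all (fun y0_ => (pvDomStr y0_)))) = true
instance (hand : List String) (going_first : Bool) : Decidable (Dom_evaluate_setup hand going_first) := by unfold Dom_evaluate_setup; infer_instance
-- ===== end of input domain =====

-- B replaces A's seven separate scans of the hand by one pass driven by a card→increment-vector map (simpler/alternative; equal output proved below).

-- ===== PORT A =====
-- sum(1 for c in hand if c in L)
def pvSumIn (hand : List String) (L : List String) : Int :=
  hand.foldl (fun acc c => if c ∈ L then acc + 1 else acc) 0

def evaluate_setup (hand : List String) (going_first : Bool) : Bool × Bool × Bool :=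
  let basics := pvSumIn hand ["Zorua","Budew","Buneary","Darumaka","Munkidori","Zekrom","Reshiram","Yveltal","Ogerpon","Fezandipiti","Pecharunt"]
  let optimalBasics := pvSumIn hand ["Zorua","Budew","Yveltal","Ogerpon"]
  let searchItem := pvSumIn hand ["UltraBall","Poffin","Pad"]
  let searchSupport := pvSumIn hand ["Cyrano","Ciphermaniac"]
  let drawSupport := pvSumIn hand ["Lillie"]
  let disruption := pvSumIn hand ["Judge","Unfair","Boss"]
  let energy := pvSumIn hand ["DarknessEnergy","PrismEnergy"]
  if going_first == true then
    let setup := decide (basics ≥ 1) && decide (energy ≥ 1) && decide (searchItem ≥ 1)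
    let optimalSetup := decide (optimalBasics ≥ 1) && decide (energy ≥ 1) && decide (searchItem ≥ 2) && decide (drawSupport ≥ 1)
    let pressure := setup && decide (disruption ≥ 1)
    (setup, pressure, optimalSetup)
  else
    let setup := decide (basics ≥ 1) && decide (energy ≥ 1) && (decide (searchItem ≥ 1) || decide (drawSupport ≥ 1))
    let optimalSetup := decide (optimalBasics ≥ 1) && decide (energy ≥ 1) && decide (searchItem ≥ 2) && (decide (drawSupport ≥ 1) || decide (searchSupport ≥ 1))
    let pressure := setup && decide (disruption ≥ 1)
    (setup, pressure, optimalSetup)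

-- ===== PORT B =====
abbrev PvVec7 := Int × Int × Int × Int × Int × Int × Int

def pvVecDict : PySem.Dict String PvVec7 := PySem.Dict.mk [
  ("Zorua",          (1, 1, 0, 0, 0, 0, 0)),
  ("Budew",          (1, 1, 0, 0, 0, 0, 0)),
  ("Buneary",        (1, 0, 0, 0, 0, 0, 0)),
  ("Darumaka",       (1, 0, 0, 0, 0, 0, 0)),
  ("Munkidori",      (1, 0, 0, 0, 0, 0, 0)),
  ("Zekrom",         (1, 0, 0, 0, 0, 0, 0)),
  ("Reshiram",       (1, 0, 0, 0, 0, 0, 0)),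
  ("Yveltal",        (1, 1, 0, 0, 0, 0, 0)),
  ("Ogerpon",        (1, 1, 0, 0, 0, 0, 0)),
  ("Fezandipiti",    (1, 0, 0, 0, 0, 0, 0)),
  ("Pecharunt",      (1, 0, 0, 0, 0, 0, 0)),
  ("UltraBall",      (0, 0, 1, 0, 0, 0, 0)),
  ("Poffin",         (0, 0, 1, 0, 0, 0, 0)),
  ("Pad",            (0, 0, 1, 0, 0, 0, 0)),
  ("Cyrano",         (0, 0, 0, 1, 0, 0, 0)),
  ("Ciphermaniac",   (0, 0, 0, 1, 0, 0, 0)),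
  ("Lillie",         (0, 0, 0, 0, 1, 0, 0)),
  ("Judge",          (0, 0, 0, 0, 0, 1, 0)),
  ("Unfair",         (0, 0, 0, 0, 0, 1, 0)),
  ("Boss",           (0, 0, 0, 0, 0, 1, 0)),
  ("DarknessEnergy", (0, 0, 0, 0, 0, 0, 1)),
  ("PrismEnergy",    (0, 0, 0, 0, 0, 0, 1))]

def pvStep (acc : PvVec7) (c : String) : PvVec7 :=
  let v := pvVecDict.getD c (0, 0, 0, 0, 0, 0, 0)
  (acc.1 + v.1, acc.2.1 + v.2.1, acc.2.2.1 + v.2.2.1, acc.2.2.2.1 + v.2.2.2.1,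
   acc.2.2.2.2.1 + v.2.2.2.2.1, acc.2.2.2.2.2.1 + v.2.2.2.2.2.1, acc.2.2.2.2.2.2 + v.2.2.2.2.2.2)

def evaluate_setup_alt (hand : List String) (going_first : Bool) : Bool × Bool × Bool :=
  let s := hand.foldl pvStep (0, 0, 0, 0, 0, 0, 0)
  let basics := s.1
  let optimalBasics := s.2.1
  let searchItem := s.2.2.1
  let searchSupport := s.2.2.2.1
  let drawSupport := s.2.2.2.2.1
  let disruption := s.2.2.2.2.2.1
  let energy := s.2.2.2.2.2.2
  let setup :=
    if going_first then decide (basics ≥ 1) && decide (energy ≥ 1) && decide (searchItem ≥ 1)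
    else decide (basics ≥ 1) && decide (energy ≥ 1) && (decide (searchItem ≥ 1) || decide (drawSupport ≥ 1))
  let optimalSetup :=
    if going_first then decide (optimalBasics ≥ 1) && decide (energy ≥ 1) && decide (searchItem ≥ 2) && decide (drawSupport ≥ 1)
    else decide (optimalBasics ≥ 1) && decide (energy ≥ 1) && decide (searchItem ≥ 2) && (decide (drawSupport ≥ 1) || decide (searchSupport ≥ 1))
  let pressure := setup && decide (disruption ≥ 1)
  (setup, pressure, optimalSetup)

-- ===== PRECONDITION & SPEC =====
def Spec_evaluate_setup (hand : List String) (going_first : Bool) (out : Bool × Bool × Bool) : Prop := out = evaluate_setup_alt hand going_first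
instance (hand : List String) (going_first : Bool) (out : Bool × Bool × Bool) : Decidable (Spec_evaluate_setup hand going_first out) := by unfold Spec_evaluate_setup; infer_instance

-- ===== CLAIM (what is proved, stated in full; the proofs are below) =====
def Claim_equal_evaluate_setup : Prop := ∀ (hand : List String) (going_first : Bool), Dom_evaluate_setup hand going_first → Spec_evaluate_setup hand going_first (evaluate_setup hand going_first)

-- ===== LEMMAS AND PROOFS =====

-- indicator: the per-card contribution of one of A's membership tests
def pvInd (c : String) (L : List String) : Int := if c ∈ L then 1 else 0

-- the vector looked up by B is exactly the tuple of A's seven indicators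
theorem pvVec_eq_ind (c : String) :
    pvVecDict.getD c (0, 0, 0, 0, 0, 0, 0) =
      (pvInd c ["Zorua","Budew","Buneary","Darumaka","Munkidori","Zekrom","Reshiram","Yveltal","Ogerpon","Fezandipiti","Pecharunt"],
       pvInd c ["Zorua","Budew","Yveltal","Ogerpon"],
       pvInd c ["UltraBall","Poffin","Pad"],
       pvInd c ["Cyrano","Ciphermaniac"],
       pvInd c ["Lillie"],
       pvInd c ["Judge","Unfair","Boss"],
       pvInd c ["DarknessEnergy","PrismEnergy"]) := by
  simp only [pvVecDict, PySem.Dict.getD, PySem.Dict.get?_mk_cons, pvInd]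
  rcases eq_or_ne ("Zorua" : String) c with rfl | h1
  · decide
  rcases eq_or_ne ("Budew" : String) c with rfl | h2
  · decide
  rcases eq_or_ne ("Buneary" : String) c with rfl | h3
  · decide
  rcases eq_or_ne ("Darumaka" : String) c with rfl | h4
  · decide
  rcases eq_or_ne ("Munkidori" : String) c with rfl | h5
  · decide
  rcases eq_or_ne ("Zekrom" : String) c with rfl | h6
  · decide
  rcases eq_or_ne ("Reshiram" : String) c with rfl | h7
  · decide
  rcases eq_or_ne ("Yveltal" : String) c with rfl | h8
  · decide
  rcases eq_or_ne ("Ogerpon" : String) c with rfl | h9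
  · decide
  rcases eq_or_ne ("Fezandipiti" : String) c with rfl | h10
  · decide
  rcases eq_or_ne ("Pecharunt" : String) c with rfl | h11
  · decide
  rcases eq_or_ne ("UltraBall" : String) c with rfl | h12
  · decide
  rcases eq_or_ne ("Poffin" : String) c with rfl | h13
  · decide
  rcases eq_or_ne ("Pad" : String) c with rfl | h14
  · decide
  rcases eq_or_ne ("Cyrano" : String) c with rfl | h15
  · decide
  rcases eq_or_ne ("Ciphermaniac" : String) c with rfl | h16
  · decide
  rcases eq_or_ne ("Lillie" : String) c with rfl | h17
  · decide
  rcases eq_or_ne ("Judge" : String) c with rfl | h18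
  · decide
  rcases eq_or_ne ("Unfair" : String) c with rfl | h19
  · decide
  rcases eq_or_ne ("Boss" : String) c with rfl | h20
  · decide
  rcases eq_or_ne ("DarknessEnergy" : String) c with rfl | h21
  · decide
  rcases eq_or_ne ("PrismEnergy" : String) c with rfl | h22
  · decide
  simp only [beq_iff_eq, if_neg h1, if_neg h2, if_neg h3, if_neg h4, if_neg h5, if_neg h6, if_neg h7, if_neg h8, if_neg h9, if_neg h10, if_neg h11, if_neg h12, if_neg h13, if_neg h14, if_neg h15, if_neg h16, if_neg h17, if_neg h18, if_neg h19, if_neg h20, if_neg h21, if_neg h22, PySem.Dict.get?, Option.getD]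
  simp [Ne.symm h1, Ne.symm h2, Ne.symm h3, Ne.symm h4, Ne.symm h5, Ne.symm h6, Ne.symm h7, Ne.symm h8, Ne.symm h9, Ne.symm h10, Ne.symm h11, Ne.symm h12, Ne.symm h13, Ne.symm h14, Ne.symm h15, Ne.symm h16, Ne.symm h17, Ne.symm h18, Ne.symm h19, Ne.symm h20, Ne.symm h21, Ne.symm h22]

theorem pvSumIn_shift (hand : List String) (L : List String) (a : Int) :
    hand.foldl (fun acc c => if c ∈ L then acc + 1 else acc) a = a + pvSumIn hand L := by
  induction hand generalizing a with
  | nil => simp [pvSumIn]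
  | cons c t ih =>
    simp only [pvSumIn, List.foldl_cons]
    rw [ih, ih (if c ∈ L then (0:Int) + 1 else 0)]
    split_ifs <;> ring

theorem pvSumIn_cons (c : String) (t : List String) (L : List String) :
    pvSumIn (c :: t) L = pvInd c L + pvSumIn t L := by
  simp only [pvSumIn, pvInd, List.foldl_cons]
  rw [pvSumIn_shift]
  split_ifs <;> simp [pvSumIn]

theorem pvFold_eq (hand : List String) (a : PvVec7) :
    hand.foldl pvStep a =
      (a.1 + pvSumIn hand ["Zorua","Budew","Buneary","Darumaka","Munkidori","Zekrom","Reshiram","Yveltal","Ogerpon","Fezandipiti","Pecharunt"],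
       a.2.1 + pvSumIn hand ["Zorua","Budew","Yveltal","Ogerpon"],
       a.2.2.1 + pvSumIn hand ["UltraBall","Poffin","Pad"],
       a.2.2.2.1 + pvSumIn hand ["Cyrano","Ciphermaniac"],
       a.2.2.2.2.1 + pvSumIn hand ["Lillie"],
       a.2.2.2.2.2.1 + pvSumIn hand ["Judge","Unfair","Boss"],
       a.2.2.2.2.2.2 + pvSumIn hand ["DarknessEnergy","PrismEnergy"]) := by
  induction hand generalizing a with
  | nil => simp [pvSumIn]
  | cons c t ih =>
    simp only [List.foldl_cons]
    rw [ih]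
    simp only [pvStep, pvVec_eq_ind, pvSumIn_cons]
    obtain ⟨a1, a2, a3, a4, a5, a6, a7⟩ := a
    simp only [Prod.mk.injEq]
    refine ⟨by ring, by ring, by ring, by ring, by ring, by ring, by ring⟩

-- ===== VERDICT (by name: the statement is the Claim_ definition above) =====
theorem evaluate_setup_spec : Claim_equal_evaluate_setup := by
  intro hand going_first _
  show evaluate_setup hand going_first = evaluate_setup_alt hand going_first
  simp only [evaluate_setup, evaluate_setup_alt, pvFold_eq, Int.zero_add]
  cases going_first <;> simp
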